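-- pv_equiv track=rewrite | github.com/shlomif/euler685-python3-solution-high-ram-consumption | 685-v1.py | brute_calc_f
-- ===== SOURCE A (Python) =====
-- def digit_sum(n):
--     return sum([int(d) for d in str(n)])
--
-- def brute_calc_f(n, m):
--     ret = 1
--     while True:
--         if digit_sum(ret) == n:
--             m -= 1
--             if not m:
--                 return ret
--         ret += 1
-- ===== SOURCE B (Python) =====
-- def brute_calc_f(n, m):
--     # m-th positive integer with digit sum n, built combinatorially:
--     # count numbers by digit-length, then construct digits greedily (unranking).
--     memo = {}
--
--     def ways(j, s):
--         # number of digit strings of length j over 0..9 with digit sum s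
--         if s < 0:
--             return 0
--         if j == 0:
--             return 1 if s == 0 else 0
--         if (j, s) not in memo:
--             memo[(j, s)] = sum(ways(j - 1, s - d) for d in range(10))
--         return memo[(j, s)]
--
--     def count_len(k):
--         # k-digit numbers (no leading zero) with digit sum n
--         return sum(ways(k - 1, n - d) for d in range(1, 10))
--
--     k = 1
--     c = count_len(1)
--     while m > c:
--         m -= c
--         k += 1
--         c = count_len(k)
--     num = 0
--     s = n
--     for j in range(k - 1, -1, -1):
--         d = 1 if j == k - 1 else 0
--         while m > ways(j, s - d):
--             m -= ways(j, s - d)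
--             d += 1
--         num = num * 10 + d
--         s -= d
--     return num
-- ===== Notes on version B (the rewrite author's own statement) =====
-- stated objective: faster
-- what changed: Replaces the linear scan over all integers (testing each digit sum via str) with combinatorial counting by digit length plus greedy digit-by-digit unranking using a memoized count of digit strings, so the answer is constructed directly instead of found by enumeration.
import Mathlib
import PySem

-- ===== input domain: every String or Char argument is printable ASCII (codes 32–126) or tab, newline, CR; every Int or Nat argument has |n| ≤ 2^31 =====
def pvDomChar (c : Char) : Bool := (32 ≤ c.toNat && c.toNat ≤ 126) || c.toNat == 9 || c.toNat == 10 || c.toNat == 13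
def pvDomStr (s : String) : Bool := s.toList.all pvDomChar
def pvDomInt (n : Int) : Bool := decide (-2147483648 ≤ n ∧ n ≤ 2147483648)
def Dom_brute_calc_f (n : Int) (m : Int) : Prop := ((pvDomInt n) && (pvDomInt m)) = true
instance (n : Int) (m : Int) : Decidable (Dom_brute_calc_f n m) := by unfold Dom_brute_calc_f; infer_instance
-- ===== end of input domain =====

-- B replaces A's linear scan over every integer with combinatorial counting by digit
-- length plus greedy digit-by-digit unranking (measured faster in a timing run).

-- ===== PORT A =====
-- digit_sum(k) = sum([int(d) for d in str(k)]).  int(d) is PySem.Int.ofChars? on the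
-- one-char string; inside A it is only applied to str(ret) for ret ≥ 1, whose chars are
-- all decimal digits, so ofChars? is always `some` and the .getD 0 default is never taken.
def pyDigitSum (k : Int) : Int :=
  ((PySem.Int.toChars k).map (fun c => (PySem.Int.ofChars? [c]).getD 0)).sum

-- the `while True` loop; the Nat fuel only makes it total (0 on exhaustion is
-- unreachable for the fuel brute_calc_f passes on inputs satisfying Pre_).
def bruteLoop (n : Int) : Nat → Int → Int → Int
  | 0, _, _ => 0
  | fuel + 1, ret, m =>
    if pyDigitSum ret = n then
      if m - 1 = 0 then ret else bruteLoop n fuel (ret + 1) (m - 1)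
    else bruteLoop n fuel (ret + 1) m

def brute_calc_f (n : Int) (m : Int) : Int :=
  bruteLoop n (10 ^ ((n.toNat + 8) / 9 + m.toNat)) 1 m

-- ===== PORT B =====
-- ways(j, s): digit strings of length j over 0..9 with digit sum s (Source B memoizes;
-- the port is the same recursion without the memo table — identical values).
def waysB : Nat → Int → Int
  | 0, s => if s < 0 then 0 else if s = 0 then 1 else 0
  | j + 1, s => if s < 0 then 0 else ((List.range 10).map (fun (d : Nat) => waysB j (s - (d : Int)))).sum

-- count_len(k) = sum(ways(k-1, n-d) for d in range(1, 10))
def countLenB (n : Int) (k : Nat) : Int :=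
  ((List.range' 1 9).map (fun (d : Nat) => waysB (k - 1) (n - (d : Int)))).sum

-- the `while m > c` length-selection loop; fuel only for totality
def skipB (n : Int) : Nat → Nat → Int → Nat × Int
  | 0, k, m => (k, m)
  | fuel + 1, k, m =>
    let c := countLenB n k
    if m > c then skipB n fuel (k + 1) (m - c) else (k, m)

-- the inner `while m > ways(j, s-d)` digit-selection loop; fuel only for totality
def pickB (j : Nat) (s : Int) : Nat → Int → Int → Int × Int
  | 0, d, m => (d, m)
  | fuel + 1, d, m =>
    let w := waysB j (s - d)
    if m > w then pickB j s fuel (d + 1) (m - w) else (d, m)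

-- the `for j in range(k-1, -1, -1)` digit-construction loop (t = j + 1 positions left)
def buildB (k : Nat) : Nat → Int → Int → Int → Int
  | 0, num, _, _ => num
  | t + 1, num, s, m =>
    let d0 : Int := if t + 1 = k then 1 else 0
    let p := pickB t s 10 d0 m
    buildB k t (num * 10 + p.1) (s - p.1) p.2

def brute_calc_f_alt (n : Int) (m : Int) : Int :=
  let km := skipB n ((n.toNat + 8) / 9 + m.toNat + 2) 1 m
  buildB km.1 km.1 0 n km.2

-- ===== PRECONDITION & SPEC =====
-- Pre_ excludes exactly the inputs (n ≤ 0 or m ≤ 0) on which Python's A loops forever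
-- and never returns; A returns on every input with n ≥ 1 and m ≥ 1.
def Pre_brute_calc_f (n : Int) (m : Int) : Prop := 1 ≤ n ∧ 1 ≤ m
instance (n : Int) (m : Int) : Decidable (Pre_brute_calc_f n m) := by
  unfold Pre_brute_calc_f; infer_instance

def pvWitness_brute_calc_f : Int × Int := (5, 3)

def Spec_brute_calc_f (n : Int) (m : Int) (out : Int) : Prop := out = brute_calc_f_alt n m
instance (n : Int) (m : Int) (out : Int) : Decidable (Spec_brute_calc_f n m out) := by
  unfold Spec_brute_calc_f; infer_instance

-- ===== CLAIM (what is proved, stated in full; the proofs are below) =====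
def Claim_equal_brute_calc_f : Prop :=
  ∀ (n : Int) (m : Int), Dom_brute_calc_f n m → Pre_brute_calc_f n m →
    Spec_brute_calc_f n m (brute_calc_f n m)

-- ===== LEMMAS AND PROOFS =====

-- ---- spec-side vocabulary ----

-- arithmetic digit sum
def dsN (x : Nat) : Nat := if h : x = 0 then 0 else x % 10 + dsN (x / 10)

-- digit strings of length j over lo..9 (first digit) then 0..9, with digit sum s,
-- in lexicographic (= numeric) order
def enumD : Nat → Nat → Nat → List (List Nat)
  | 0, s, _ => if s = 0 then [[]] else []
  | j + 1, s, lo =>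
    if lo < 10 then
      (if lo ≤ s then (enumD j (s - lo) 0).map (lo :: ·) else []) ++ enumD (j + 1) s (lo + 1)
    else []
  termination_by j _ lo => (j, 10 - lo)
  decreasing_by all_goals (simp_wf; omega)

def valD (l : List Nat) : Nat := l.foldl (fun a d => 10 * a + d) 0

-- the ordered list of matches A's scan passes: x in [ret, ret+f) with pyDigitSum x = n
def scanL (n : Int) : Int → Nat → List Int
  | _, 0 => []
  | ret, f + 1 =>
    if pyDigitSum ret = n then ret :: scanL n (ret + 1) f else scanL n (ret + 1) f

-- ---- A-side scan lemmas ----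

lemma scanL_append (n : Int) : ∀ (f1 f2 : Nat) (ret : Int),
    scanL n ret (f1 + f2) = scanL n ret f1 ++ scanL n (ret + f1) f2 := by
  intro f1
  induction f1 with
  | zero => intro f2 ret; simp [scanL]
  | succ f ih =>
    intro f2 ret
    show scanL n ret (f + 1 + f2) = _
    have : f + 1 + f2 = (f + f2) + 1 := by omega
    rw [this]
    simp only [scanL]
    split
    · simp [ih]; ring_nf
    · simp [ih]; ring_nf

lemma mem_scanL (n : Int) : ∀ (f : Nat) (ret x : Int),
    x ∈ scanL n ret f ↔ ret ≤ x ∧ x < ret + f ∧ pyDigitSum x = n := by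
  intro f
  induction f with
  | zero => intro ret x; simp [scanL]; omega
  | succ f ih =>
    intro ret x
    simp only [scanL]
    split
    · rename_i h
      simp only [List.mem_cons, ih]
      constructor
      · rintro (rfl | ⟨h1, h2, h3⟩)
        · exact ⟨le_refl _, by push_cast; omega, h⟩
        · exact ⟨by omega, by push_cast at h2 ⊢; omega, h3⟩
      · rintro ⟨h1, h2, h3⟩
        rcases eq_or_lt_of_le h1 with rfl | hlt
        · exact Or.inl rfl
        · exact Or.inr ⟨by omega, by push_cast at h2 ⊢; omega, h3⟩
    · rename_i h
      rw [ih]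
      constructor
      · rintro ⟨h1, h2, h3⟩
        exact ⟨by omega, by push_cast at h2 ⊢; omega, h3⟩
      · rintro ⟨h1, h2, h3⟩
        have : x ≠ ret := by rintro rfl; exact h h3
        exact ⟨by omega, by push_cast at h2 ⊢; omega, h3⟩

lemma sorted_scanL (n : Int) : ∀ (f : Nat) (ret : Int), (scanL n ret f).Pairwise (· < ·) := by
  intro f
  induction f with
  | zero => intro ret; simp [scanL]
  | succ f ih =>
    intro ret
    simp only [scanL]
    split
    · refine List.Pairwise.cons ?_ (ih _)
      intro y hy
      have := (mem_scanL n f (ret + 1) y).1 hy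
      omega
    · exact ih _

lemma bruteLoop_eq (n : Int) : ∀ (f : Nat) (ret m : Int), 1 ≤ m →
    m.toNat ≤ (scanL n ret f).length →
    bruteLoop n f ret m = (scanL n ret f).getD (m.toNat - 1) 0 := by
  intro f
  induction f with
  | zero => intro ret m hm hlen; simp [scanL] at hlen; omega
  | succ f ih =>
    intro ret m hm hlen
    simp only [bruteLoop, scanL] at *
    split
    · rename_i h
      rw [if_pos h] at hlen
      by_cases hm1 : m - 1 = 0
      · have : m = 1 := by omega
        subst this
        norm_num
      · rw [if_neg hm1, ih (ret + 1) (m - 1) (by omega)]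
        · have h1 : m.toNat - 1 = (m - 1).toNat - 1 + 1 := by omega
          rw [h1, List.getD_cons_succ]
        · simp only [List.length_cons] at hlen
          omega
    · rename_i h
      rw [if_neg h] at hlen
      exact ih (ret + 1) m hm hlen

-- ---- digit-sum bridge ----

lemma dsN_unfold (v : Nat) : dsN v = v % 10 + dsN (v / 10) := by
  by_cases h : v = 0
  · subst h; simp [dsN]
  · rw [dsN]; simp [h]

lemma dsN_add_pow : ∀ (j d v : Nat), d ≤ 9 → v < 10 ^ j → dsN (d * 10 ^ j + v) = d + dsN v := by
  intro j
  induction j with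
  | zero =>
    intro d v hd hv
    interval_cases v
    have h1 : d % 10 = d := Nat.mod_eq_of_lt (by omega)
    have h2 : d / 10 = 0 := Nat.div_eq_of_lt (by omega)
    rw [show d * 10 ^ 0 + 0 = d by ring, dsN_unfold d, h1, h2]
  | succ j ih =>
    intro d v hd hv
    rw [dsN_unfold (d * 10 ^ (j + 1) + v), dsN_unfold v]
    have e1 : (d * 10 ^ (j + 1) + v) % 10 = v % 10 := by
      have : d * 10 ^ (j + 1) = (d * 10 ^ j) * 10 := by ring
      rw [this]
      omega
    have e2 : (d * 10 ^ (j + 1) + v) / 10 = d * 10 ^ j + v / 10 := by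
      have : d * 10 ^ (j + 1) = (d * 10 ^ j) * 10 := by ring
      rw [this]
      omega
    rw [e1, e2, ih d (v / 10) hd (by
      have : 10 ^ (j + 1) = 10 ^ j * 10 := by ring
      omega)]
    omega

lemma int_of_digitChar (d : Nat) (h : d < 10) :
    (PySem.Int.ofChars? [Nat.digitChar d]).getD 0 = (d : Int) := by
  interval_cases d <;> decide

lemma pyDigitSum_nat (v : Nat) : pyDigitSum (v : Int) = (dsN v : Int) := by
  induction v using Nat.strong_induction_on with
  | _ v ih =>
    have htc : PySem.Int.toChars (v : Int) = Nat.toDigits 10 v := by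
      unfold PySem.Int.toChars
      rw [if_neg (by omega)]
      norm_num
    unfold pyDigitSum
    rw [htc]
    by_cases hv : v < 10
    · rw [Nat.toDigits_of_lt_base hv]
      simp only [List.map_cons, List.map_nil, List.sum_cons, List.sum_nil, add_zero]
      rw [int_of_digitChar v hv, dsN_unfold v]
      have h1 : v % 10 = v := Nat.mod_eq_of_lt hv
      have h2 : v / 10 = 0 := Nat.div_eq_of_lt hv
      rw [h1, h2]
      simp [dsN]
    · rw [Nat.toDigits_of_base_le (by omega) (by omega)]
      rw [List.map_append, List.sum_append]
      have ihv : ((Nat.toDigits 10 (v / 10)).map (fun c => (PySem.Int.ofChars? [c]).getD 0)).sum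
          = (dsN (v / 10) : Int) := by
        have := ih (v / 10) (Nat.div_lt_self (by omega) (by omega))
        have htc' : PySem.Int.toChars ((v / 10 : Nat) : Int) = Nat.toDigits 10 (v / 10) := by
          unfold PySem.Int.toChars
          rw [if_neg (by omega), Int.toNat_natCast]
        unfold pyDigitSum at this
        rwa [htc'] at this
      rw [ihv]
      simp only [List.map_cons, List.map_nil, List.sum_cons, List.sum_nil, add_zero]
      rw [int_of_digitChar (v % 10) (by omega), dsN_unfold v]
      push_cast
      ring

-- ---- enumeration lemmas ----

lemma valD_aux : ∀ (l : List Nat) (a : Nat),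
    l.foldl (fun a d => 10 * a + d) a = a * 10 ^ l.length + valD l := by
  intro l
  induction l with
  | nil => intro a; simp [valD]
  | cons d t ih =>
    intro a
    show List.foldl _ (10 * a + d) t = _
    rw [ih (10 * a + d)]
    have : valD (d :: t) = List.foldl (fun a d => 10 * a + d) (10 * 0 + d) t := rfl
    rw [this, ih (10 * 0 + d)]
    simp only [List.length_cons]
    ring

lemma valD_cons (d : Nat) (l : List Nat) : valD (d :: l) = d * 10 ^ l.length + valD l := by
  have h1 : valD (d :: l) = List.foldl (fun a d => 10 * a + d) d l := by simp [valD]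
  rw [h1, valD_aux l d]

lemma mem_enumD_length : ∀ (j s lo : Nat) (l : List Nat), l ∈ enumD j s lo → l.length = j := by
  intro j s lo
  induction j, s, lo using enumD.induct with
  | case1 x =>
    intro l h
    simp only [enumD] at h
    simp at h; subst h; rfl
  | case2 s x hs =>
    intro l h
    simp only [enumD, if_neg hs] at h
    simp at h
  | case3 j s lo h10 ih1 ih2 =>
    intro l h
    rw [enumD, if_pos h10] at h
    rcases List.mem_append.1 h with h1 | h2
    · split at h1
      · rcases List.mem_map.1 h1 with ⟨l', hl', rfl⟩
        simp [ih1 l' hl']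
      · simp at h1
    · exact ih2 l h2
  | case4 j s lo h10 =>
    intro l h
    rw [enumD, if_neg h10] at h
    simp at h

-- membership at lo, assuming membership at level j with lo = 0
lemma mem_enumS_of (j : Nat)
    (H : ∀ s x, x ∈ (enumD j s 0).map valD ↔ x < 10 ^ j ∧ dsN x = s) :
    ∀ (fu lo s x : Nat), lo ≤ 10 → 10 - lo ≤ fu →
      (x ∈ (enumD (j + 1) s lo).map valD ↔ lo * 10 ^ j ≤ x ∧ x < 10 ^ (j + 1) ∧ dsN x = s) := by
  intro fu
  induction fu with
  | zero =>
    intro lo s x hlo hfu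
    have hlo10 : lo = 10 := by omega
    subst hlo10
    rw [enumD, if_neg (by omega)]
    simp only [List.map_nil, List.not_mem_nil, false_iff]
    rintro ⟨h1, h2, -⟩
    have : (10 : Nat) ^ (j + 1) = 10 * 10 ^ j := by ring
    omega
  | succ fu ih =>
    intro lo s x hlo hfu
    by_cases h10 : lo < 10
    · rw [enumD, if_pos h10]
      rw [List.map_append, List.mem_append]
      have hrest := ih (lo + 1) s x (by omega) (by omega)
      constructor
      · rintro (hb | hr)
        · -- x is in the lo-block
          split at hb
          · rename_i hls
            rcases List.mem_map.1 hb with ⟨l2, hl2, rfl⟩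
            rcases List.mem_map.1 hl2 with ⟨l, hl, rfl⟩
            have hlen : l.length = j := mem_enumD_length j (s - lo) 0 l hl
            have hval : valD l ∈ (enumD j (s - lo) 0).map valD := List.mem_map_of_mem hl
            have hH := (H (s - lo) (valD l)).1 hval
            rw [valD_cons, hlen]
            have hds : dsN (lo * 10 ^ j + valD l) = lo + dsN (valD l) :=
              dsN_add_pow j lo (valD l) (by omega) hH.1
            refine ⟨by omega, ?_, ?_⟩
            · calc lo * 10 ^ j + valD l < lo * 10 ^ j + 10 ^ j := by omega
              _ = (lo + 1) * 10 ^ j := by ring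
              _ ≤ 10 * 10 ^ j := Nat.mul_le_mul_right _ (by omega)
              _ = 10 ^ (j + 1) := by ring
            · rw [hds, hH.2]; omega
          · simp at hb
        · have := hrest.1 hr
          refine ⟨?_, this.2.1, this.2.2⟩
          have := this.1
          nlinarith [pow_pos (by omega : (0:Nat) < 10) j]
      · rintro ⟨h1, h2, h3⟩
        set d := x / 10 ^ j with hd
        have hpow : (10 : Nat) ^ (j + 1) = 10 * 10 ^ j := by ring
        have hpos : 0 < (10 : Nat) ^ j := pow_pos (by omega) j
        have hd9 : d ≤ 9 := by
          rw [hd]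
          by_contra hcon
          have : 10 * 10 ^ j ≤ x := by
            calc 10 * 10 ^ j ≤ (x / 10 ^ j) * 10 ^ j := by
                  have : 10 ≤ x / 10 ^ j := by omega
                  exact Nat.mul_le_mul_right _ this
            _ ≤ x := Nat.div_mul_le_self x _
          omega
        have hdlo : lo ≤ d := by
          rw [hd]
          exact (Nat.le_div_iff_mul_le hpos).2 h1
        have hxsplit : x = d * 10 ^ j + x % 10 ^ j := by
          rw [hd, Nat.mul_comm]; exact (Nat.div_add_mod x (10 ^ j)).symm
        have hrem : x % 10 ^ j < 10 ^ j := Nat.mod_lt _ hpos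
        have hds : dsN x = d + dsN (x % 10 ^ j) := by
          conv_lhs => rw [hxsplit]
          exact dsN_add_pow j d _ hd9 hrem
        rcases Nat.eq_or_lt_of_le hdlo with hdeq | hdlt
        · -- x is in the lo-block
          left
          have hls : lo ≤ s := by
            rw [← h3, hds, ← hdeq]; omega
          rw [if_pos hls]
          have hmem : x % 10 ^ j ∈ (enumD j (s - lo) 0).map valD := by
            rw [H]
            constructor
            · exact hrem
            · rw [← h3, hds, ← hdeq]; omega
          rcases List.mem_map.1 hmem with ⟨l, hl, hvl⟩
          refine List.mem_map.2 ⟨lo :: l, List.mem_map.2 ⟨l, hl, rfl⟩, ?_⟩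
          rw [valD_cons, mem_enumD_length j (s - lo) 0 l hl, hvl]
          rw [← hdeq] at hxsplit
          omega
        · -- x is in the rest
          right
          rw [hrest]
          refine ⟨?_, h2, h3⟩
          calc (lo + 1) * 10 ^ j ≤ d * 10 ^ j := Nat.mul_le_mul_right _ (by omega)
          _ ≤ x := by omega
    · have hlo10 : lo = 10 := by omega
      subst hlo10
      rw [enumD, if_neg (by omega)]
      simp only [List.map_nil, List.not_mem_nil, false_iff]
      rintro ⟨h1, h2, -⟩
      have : (10 : Nat) ^ (j + 1) = 10 * 10 ^ j := by ring
      omega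

lemma mem_enum0 : ∀ (j s x : Nat), x ∈ (enumD j s 0).map valD ↔ x < 10 ^ j ∧ dsN x = s := by
  intro j
  induction j with
  | zero =>
    intro s x
    simp only [enumD]
    split
    · rename_i hs
      subst hs
      simp only [List.map_cons, List.map_nil, List.mem_singleton, pow_zero]
      have h0 : dsN 0 = 0 := by unfold dsN; simp
      constructor
      · rintro rfl
        exact ⟨by simp [valD], h0⟩
      · rintro ⟨h1, h2⟩
        interval_cases x
        rfl
    · rename_i hs
      simp only [List.map_nil, List.not_mem_nil, false_iff, pow_zero]
      rintro ⟨h1, h2⟩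
      interval_cases x
      have h0 : dsN 0 = 0 := by unfold dsN; simp
      omega
  | succ j ih =>
    intro s x
    rw [mem_enumS_of j ih 10 0 s x (by omega) (by omega)]
    simp

lemma mem_enumS (j lo s x : Nat) (hlo : lo ≤ 10) :
    x ∈ (enumD (j + 1) s lo).map valD ↔ lo * 10 ^ j ≤ x ∧ x < 10 ^ (j + 1) ∧ dsN x = s := by
  exact mem_enumS_of j (mem_enum0 j) (10 - lo) lo s x hlo (by omega)

lemma sorted_enumS_of (j : Nat)
    (H0 : ∀ s x, x ∈ (enumD j s 0).map valD ↔ x < 10 ^ j ∧ dsN x = s)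
    (HS : ∀ s, ((enumD j s 0).map valD).Pairwise (· < ·)) :
    ∀ (fu lo s : Nat), lo ≤ 10 → 10 - lo ≤ fu →
      ((enumD (j + 1) s lo).map valD).Pairwise (· < ·) := by
  intro fu
  induction fu with
  | zero =>
    intro lo s hlo hfu
    have : lo = 10 := by omega
    subst this
    rw [enumD, if_neg (by omega)]
    simp
  | succ fu ih =>
    intro lo s hlo hfu
    by_cases h10 : lo < 10
    · rw [enumD, if_pos h10, List.map_append]
      rw [List.pairwise_append]
      refine ⟨?_, ih (lo + 1) s (by omega) (by omega), ?_⟩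
      · -- the lo-block is pairwise <
        split
        · rename_i hls
          have hmapeq : (((enumD j (s - lo) 0).map (lo :: ·)).map valD) =
              ((enumD j (s - lo) 0).map valD).map (fun v => lo * 10 ^ j + v) := by
            rw [List.map_map, List.map_map]
            refine List.map_congr_left ?_
            intro l hl
            simp only [Function.comp_apply]
            rw [valD_cons, mem_enumD_length j (s - lo) 0 l hl]
          rw [hmapeq, List.pairwise_map]
          refine List.Pairwise.imp ?_ (HS (s - lo))
          intro a b hab
          omega
        · simp
      · -- cross inequalities
        intro x hx y hy
        have hxm : x < (lo + 1) * 10 ^ j := by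
          rcases List.mem_map.1 hx with ⟨l2, hl2, rfl⟩
          split at hl2
          · rename_i hls
            rcases List.mem_map.1 hl2 with ⟨l, hl, rfl⟩
            rw [valD_cons, mem_enumD_length j (s - lo) 0 l hl]
            have := (H0 (s - lo) (valD l)).1 (List.mem_map_of_mem hl)
            calc lo * 10 ^ j + valD l < lo * 10 ^ j + 10 ^ j := by omega
            _ = (lo + 1) * 10 ^ j := by ring
          · simp at hl2
        have hym : (lo + 1) * 10 ^ j ≤ y :=
          ((mem_enumS_of j H0 fu (lo + 1) s y (by omega) (by omega)).1 hy).1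
        omega
    · have : lo = 10 := by omega
      subst this
      rw [enumD, if_neg (by omega)]
      simp

lemma sorted_enum0 : ∀ (j s : Nat), ((enumD j s 0).map valD).Pairwise (· < ·) := by
  intro j
  induction j with
  | zero =>
    intro s
    simp only [enumD]
    split <;> simp
  | succ j ih =>
    intro s
    exact sorted_enumS_of j (mem_enum0 j) ih 10 0 s (by omega) (by omega)

lemma sorted_enumS (j lo s : Nat) (hlo : lo ≤ 10) :
    ((enumD (j + 1) s lo).map valD).Pairwise (· < ·) := by
  exact sorted_enumS_of j (mem_enum0 j) (sorted_enum0 j) (10 - lo) lo s hlo (by omega)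

-- ---- counting lemmas ----

lemma waysB_neg (j : Nat) (s : Int) (h : s < 0) : waysB j s = 0 := by
  cases j with
  | zero => rw [waysB, if_pos h]
  | succ j => rw [waysB, if_pos h]

lemma enum_len_step (j s lo : Nat) (h : lo < 10) :
    (enumD (j + 1) s lo).length =
      (if lo ≤ s then (enumD j (s - lo) 0).length else 0) + (enumD (j + 1) s (lo + 1)).length := by
  rw [enumD, if_pos h, List.length_append]
  split <;> simp

lemma len_sum (j t : Nat)
    (Hw : ∀ (s : Int), 0 ≤ s → waysB j s = ((enumD j s.toNat 0).length : Int)) :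
    ∀ (fu lo : Nat), lo ≤ 10 → 10 - lo ≤ fu →
    ((enumD (j + 1) t lo).length : Int) =
      ((List.range' lo (10 - lo)).map (fun (d : Nat) => waysB j ((t : Int) - (d : Int)))).sum := by
  intro fu
  induction fu with
  | zero =>
    intro lo hlo hfu
    have : lo = 10 := by omega
    subst this
    rw [enumD, if_neg (by omega)]
    simp
  | succ fu ih =>
    intro lo hlo hfu
    by_cases h10 : lo < 10
    · rw [enum_len_step j t lo h10]
      have hr : 10 - lo = (10 - (lo + 1)) + 1 := by omega
      rw [hr, List.range'_succ, List.map_cons, List.sum_cons]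
      rw [← ih (lo + 1) (by omega) (by omega)]
      have hiw : waysB j ((t : Int) - (lo : Int)) = ((if lo ≤ t then (enumD j (t - lo) 0).length else 0 : Nat) : Int) := by
        by_cases hls : lo ≤ t
        · rw [if_pos hls]
          have hc : (t : Int) - (lo : Int) = ((t - lo : Nat) : Int) := by omega
          rw [hc, Hw _ (by omega)]
          simp
        · rw [if_neg hls, waysB_neg j _ (by omega)]
          simp
      rw [hiw]
      push_cast
      ring
    · have : lo = 10 := by omega
      subst this
      rw [enumD, if_neg (by omega)]
      simp

lemma waysB_eq : ∀ (j : Nat) (s : Int), 0 ≤ s → waysB j s = ((enumD j s.toNat 0).length : Int) := by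
  intro j
  induction j with
  | zero =>
    intro s hs
    rw [waysB, if_neg (by omega)]
    by_cases h0 : s = 0
    · subst h0
      simp only [enumD]
      norm_num
    · rw [if_neg h0]
      simp only [enumD]
      rw [if_neg (by omega)]
      simp
  | succ j ih =>
    intro s hs
    rw [waysB, if_neg (by omega)]
    rw [len_sum j s.toNat ih 10 0 (by omega) (by omega)]
    rw [List.range_eq_range']
    congr 1
    refine List.map_congr_left ?_
    intro d _
    congr 1
    omega

lemma countLenB_eq (n : Int) (k : Nat) (hk : 1 ≤ k) (hn : 0 ≤ n) :
    countLenB n k = ((enumD k n.toNat 1).length : Int) := by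
  unfold countLenB
  have hk1 : k - 1 + 1 = k := by omega
  have h := len_sum (k - 1) n.toNat (fun s hs => waysB_eq (k - 1) s hs) 9 1 (by omega) (by omega)
  rw [hk1] at h
  rw [show ((10 : Nat) - 1) = 9 from rfl] at h
  rw [h]
  congr 1
  refine List.map_congr_left ?_
  intro d _
  congr 1
  omega

lemma countLenB_nonneg (n : Int) (k : Nat) (hk : 1 ≤ k) (hn : 0 ≤ n) : 0 ≤ countLenB n k := by
  rw [countLenB_eq n k hk hn]
  positivity

-- ---- block equality: A's scan over [10^(k-1), 10^k) is exactly the k-digit enum ----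

lemma sorted_ext : ∀ (l1 l2 : List Int), l1.Pairwise (· < ·) → l2.Pairwise (· < ·) →
    (∀ x, x ∈ l1 ↔ x ∈ l2) → l1 = l2 := by
  intro l1
  induction l1 with
  | nil =>
    intro l2 _ _ hm
    cases l2 with
    | nil => rfl
    | cons b t => exact absurd ((hm b).2 (List.mem_cons_self)) (List.not_mem_nil)
  | cons a t ih =>
    intro l2 h1 h2 hm
    cases l2 with
    | nil => exact absurd ((hm a).1 (List.mem_cons_self)) (List.not_mem_nil)
    | cons b t2 =>
      have hab : a = b := by
        have ha2 : a ∈ b :: t2 := (hm a).1 (List.mem_cons_self)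
        have hb1 : b ∈ a :: t := (hm b).2 (List.mem_cons_self)
        rcases List.mem_cons.1 ha2 with h | h
        · exact h
        · rcases List.mem_cons.1 hb1 with h' | h'
          · omega
          · have := (List.pairwise_cons.1 h1).1 b h'
            have := (List.pairwise_cons.1 h2).1 a h
            omega
      subst hab
      congr 1
      refine ih t2 (List.pairwise_cons.1 h1).2 (List.pairwise_cons.1 h2).2 ?_
      intro x
      constructor
      · intro hx
        have hax : a < x := (List.pairwise_cons.1 h1).1 x hx
        rcases List.mem_cons.1 ((hm x).1 (List.mem_cons_of_mem a hx)) with h | h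
        · omega
        · exact h
      · intro hx
        have hax : a < x := (List.pairwise_cons.1 h2).1 x hx
        rcases List.mem_cons.1 ((hm x).2 (List.mem_cons_of_mem a hx)) with h | h
        · omega
        · exact h

lemma block_eq (n : Int) (hn : 1 ≤ n) (k : Nat) (hk : 1 ≤ k) :
    scanL n ((10 ^ (k - 1) : Nat) : Int) (10 ^ k - 10 ^ (k - 1)) =
      (enumD k n.toNat 1).map (fun l => ((valD l : Nat) : Int)) := by
  have hEk : k - 1 + 1 = k := by omega
  have hpowle : (10 : Nat) ^ (k - 1) ≤ 10 ^ k := Nat.pow_le_pow_right (by omega) (by omega)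
  have hpos : 0 < (10 : Nat) ^ (k - 1) := pow_pos (by omega) _
  apply sorted_ext
  · exact sorted_scanL n _ _
  · have hp := sorted_enumS (k - 1) 1 n.toNat (by omega)
    rw [hEk] at hp
    have hmm : (enumD k n.toNat 1).map (fun l => ((valD l : Nat) : Int)) =
        ((enumD k n.toNat 1).map valD).map (fun (v : Nat) => (v : Int)) := by
      rw [List.map_map]; rfl
    rw [hmm, List.pairwise_map]
    refine List.Pairwise.imp ?_ hp
    intro a b hab
    omega
  · intro x
    rw [mem_scanL]
    constructor
    · rintro ⟨h1, h2, h3⟩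
      have hx0 : 0 ≤ x := le_trans (by positivity) h1
      have hxv : x = (x.toNat : Int) := by omega
      set v := x.toNat with hv
      have hds : dsN v = n.toNat := by
        have hps := pyDigitSum_nat v
        rw [← hxv, h3] at hps
        omega
      have hb1 : 10 ^ (k - 1) ≤ v := by omega
      have hb2 : v < 10 ^ k := by omega
      have hvm : v ∈ (enumD k n.toNat 1).map valD := by
        have hiff := mem_enumS (k - 1) 1 n.toNat v (by omega)
        rw [hEk] at hiff
        rw [hiff, one_mul]
        exact ⟨hb1, hb2, hds⟩
      rcases List.mem_map.1 hvm with ⟨l, hl, hvl⟩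
      exact List.mem_map.2 ⟨l, hl, by rw [hvl]; omega⟩
    · intro hx
      rcases List.mem_map.1 hx with ⟨l, hl, rfl⟩
      have hvm : valD l ∈ (enumD k n.toNat 1).map valD := List.mem_map_of_mem hl
      have hiff := mem_enumS (k - 1) 1 n.toNat (valD l) (by omega)
      rw [hEk, one_mul] at hiff
      obtain ⟨hb1, hb2, hd⟩ := hiff.1 hvm
      refine ⟨by omega, by omega, ?_⟩
      rw [pyDigitSum_nat (valD l), hd]
      omega

-- blocks of lengths 1..k concatenated
def prefixL (n : Int) : Nat → List Int
  | 0 => []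
  | k + 1 => prefixL n k ++ (enumD (k + 1) n.toNat 1).map (fun l => ((valD l : Nat) : Int))

lemma prefix_eq (n : Int) (hn : 1 ≤ n) : ∀ (k : Nat),
    scanL n 1 (10 ^ k - 1) = prefixL n k := by
  intro k
  induction k with
  | zero => simp [scanL, prefixL]
  | succ k ih =>
    have h1le : (1 : Nat) ≤ 10 ^ k := Nat.one_le_pow _ _ (by omega)
    have hle : (10 : Nat) ^ k ≤ 10 ^ (k + 1) := Nat.pow_le_pow_right (by omega) (by omega)
    have hsplit : 10 ^ (k + 1) - 1 = (10 ^ k - 1) + (10 ^ (k + 1) - 10 ^ k) := by omega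
    rw [hsplit, scanL_append, ih]
    have hret : (1 : Int) + ((10 ^ k - 1 : Nat) : Int) = ((10 ^ k : Nat) : Int) := by
      push_cast [h1le]
      omega
    rw [hret]
    have hb := block_eq n hn (k + 1) (by omega)
    rw [show k + 1 - 1 = k by omega] at hb
    rw [hb]
    rfl

def sumCnt (n : Int) (k t : Nat) : Int := ((List.range' k t).map (fun i => countLenB n i)).sum

lemma prefixL_length (n : Int) (hn : 1 ≤ n) : ∀ (k : Nat),
    ((prefixL n k).length : Int) = sumCnt n 1 k := by
  intro k
  induction k with
  | zero => simp [prefixL, sumCnt]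
  | succ k ih =>
    show ((prefixL n k ++ _).length : Int) = _
    rw [List.length_append]
    have hcnt : ((enumD (k + 1) n.toNat 1).map (fun l => ((valD l : Nat) : Int))).length
        = (enumD (k + 1) n.toNat 1).length := List.length_map _
    have hsum : sumCnt n 1 (k + 1) = sumCnt n 1 k + countLenB n (k + 1) := by
      unfold sumCnt
      rw [List.range'_concat, List.map_append, List.sum_append,
        show 1 + 1 * k = k + 1 by omega]
      simp
    rw [hsum, ← ih]
    rw [countLenB_eq n (k + 1) (by omega) (by omega), hcnt]
    push_cast
    ring

lemma sumCnt_split (n : Int) (a b c : Nat) :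
    sumCnt n a (b + c) = sumCnt n a b + sumCnt n (a + b) c := by
  unfold sumCnt
  rw [show List.range' a (b + c) = List.range' a b ++ List.range' (a + b) c by
    have h := List.range'_append (s := a) (m := b) (n := c) (step := 1)
    rw [show a + 1 * b = a + b by omega] at h
    exact h.symm]
  rw [List.map_append, List.sum_append]

-- ---- generic sum bounds ----

lemma sum_nonneg_int : ∀ (L : List Nat) (f : Nat → Int), (∀ i ∈ L, 0 ≤ f i) → 0 ≤ (L.map f).sum := by
  intro L
  induction L with
  | nil => intro f _; simp
  | cons a t ih =>
    intro f h
    rw [List.map_cons, List.sum_cons]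
    have h1 := h a (List.mem_cons_self)
    have h2 := ih f (fun i hi => h i (List.mem_cons_of_mem a hi))
    omega

lemma sum_ge_len_int : ∀ (L : List Nat) (f : Nat → Int), (∀ i ∈ L, 1 ≤ f i) →
    (L.length : Int) ≤ (L.map f).sum := by
  intro L
  induction L with
  | nil => intro f _; simp
  | cons a t ih =>
    intro f h
    rw [List.map_cons, List.sum_cons, List.length_cons]
    have h1 := h a (List.mem_cons_self)
    have h2 := ih f (fun i hi => h i (List.mem_cons_of_mem a hi))
    push_cast
    omega

-- ---- existence witness: for i ≥ (n-1)/9 + 1 there is an i-digit number with digit sum n ----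

lemma dsN_nines : ∀ (q : Nat), dsN (10 ^ q - 1) = 9 * q := by
  intro q
  induction q with
  | zero => unfold dsN; simp
  | succ q ih =>
    have hpos : 0 < (10 : Nat) ^ q := pow_pos (by omega) _
    have hsplit : 10 ^ (q + 1) - 1 = 9 * 10 ^ q + (10 ^ q - 1) := by
      have : (10 : Nat) ^ (q + 1) = 10 * 10 ^ q := by ring
      omega
    rw [hsplit, dsN_add_pow q 9 (10 ^ q - 1) (by omega) (by omega), ih]
    ring

lemma dsN_mul_pow10 : ∀ (t : Nat) (x : Nat), dsN (x * 10 ^ t) = dsN x := by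
  intro t
  induction t with
  | zero => intro x; simp
  | succ t ih =>
    intro x
    have hsplit : x * 10 ^ (t + 1) = (x * 10 ^ t) * 10 := by ring
    rw [hsplit, dsN_unfold]
    have h1 : x * 10 ^ t * 10 % 10 = 0 := by omega
    have h2 : x * 10 ^ t * 10 / 10 = x * 10 ^ t := by omega
    rw [h1, h2, ih x]
    simp

lemma cnt_pos (n : Int) (hn : 1 ≤ n) (i : Nat) (hi : (n.toNat - 1) / 9 + 1 ≤ i) :
    1 ≤ countLenB n i := by
  set q := (n.toNat - 1) / 9 with hq
  set rr := n.toNat - 9 * q with hrr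
  have hn1 : 1 ≤ n.toNat := by omega
  have hrr9 : 1 ≤ rr ∧ rr ≤ 9 := by omega
  have hqpos : 0 < (10 : Nat) ^ q := pow_pos (by omega) _
  set c := rr * 10 ^ q + (10 ^ q - 1) with hc
  have hdsc : dsN c = n.toNat := by
    rw [hc, dsN_add_pow q rr (10 ^ q - 1) (by omega) (by omega), dsN_nines]
    omega
  have hclb : 10 ^ q ≤ c := by
    have : 1 * 10 ^ q ≤ rr * 10 ^ q := Nat.mul_le_mul_right _ (by omega)
    omega
  have hcub : c < 10 ^ (q + 1) := by
    have h9 : rr * 10 ^ q ≤ 9 * 10 ^ q := Nat.mul_le_mul_right _ (by omega)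
    have : (10 : Nat) ^ (q + 1) = 10 * 10 ^ q := by ring
    omega
  set e := c * 10 ^ (i - (q + 1)) with he
  have hdse : dsN e = n.toNat := by rw [he, dsN_mul_pow10, hdsc]
  have helb : 10 ^ (i - 1) ≤ e := by
    calc (10 : Nat) ^ (i - 1) = 10 ^ q * 10 ^ (i - (q + 1)) := by
          rw [← pow_add]
          congr 1
          omega
    _ ≤ c * 10 ^ (i - (q + 1)) := Nat.mul_le_mul_right _ hclb
  have heub : e < 10 ^ i := by
    calc e < 10 ^ (q + 1) * 10 ^ (i - (q + 1)) :=
          (Nat.mul_lt_mul_right (pow_pos (by omega) _)).2 hcub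
    _ = 10 ^ i := by
          rw [← pow_add]
          congr 1
          omega
  have hmem : e ∈ (enumD i n.toNat 1).map valD := by
    have hiff := mem_enumS (i - 1) 1 n.toNat e (by omega)
    rw [show i - 1 + 1 = i by omega, one_mul] at hiff
    rw [hiff]
    exact ⟨helb, heub, hdse⟩
  have hne : enumD i n.toNat 1 ≠ [] := by
    rcases List.mem_map.1 hmem with ⟨l, hl, -⟩
    exact List.ne_nil_of_mem hl
  have hlen : 1 ≤ (enumD i n.toNat 1).length := List.length_pos_iff.2 hne
  rw [countLenB_eq n i (by omega) (by omega)]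
  omega

-- ---- skip loop ----

lemma skip_spec (n : Int) : ∀ (fuel k : Nat) (m : Int), 1 ≤ k → 1 ≤ m →
    m ≤ sumCnt n k fuel →
    ∃ (K : Nat), skipB n fuel k m = (K, m - sumCnt n k (K - k)) ∧ k ≤ K ∧
      1 ≤ m - sumCnt n k (K - k) ∧ m - sumCnt n k (K - k) ≤ countLenB n K := by
  intro fuel
  induction fuel with
  | zero =>
    intro k m hk hm hsum
    unfold sumCnt at hsum
    simp at hsum
    omega
  | succ fuel ih =>
    intro k m hk hm hsum
    have hsplit : sumCnt n k (fuel + 1) = countLenB n k + sumCnt n (k + 1) fuel := by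
      unfold sumCnt
      rw [List.range'_succ, List.map_cons, List.sum_cons]
    by_cases hgt : m > countLenB n k
    · obtain ⟨K, hrun, hKk, hm1, hm2⟩ :=
        ih (k + 1) (m - countLenB n k) (by omega) (by omega) (by omega)
      refine ⟨K, ?_, by omega, ?_, ?_⟩
      · show skipB n (fuel + 1) k m = _
        rw [skipB]
        simp only [if_pos hgt]
        rw [hrun]
        have harr : m - countLenB n k - sumCnt n (k + 1) (K - (k + 1)) =
            m - sumCnt n k (K - k) := by
          have hKk1 : K - k = (K - (k + 1)) + 1 := by omega
          rw [hKk1]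
          unfold sumCnt
          rw [List.range'_succ, List.map_cons, List.sum_cons]
          ring
        rw [harr]
      · have harr : m - countLenB n k - sumCnt n (k + 1) (K - (k + 1)) =
            m - sumCnt n k (K - k) := by
          have hKk1 : K - k = (K - (k + 1)) + 1 := by omega
          rw [hKk1]
          unfold sumCnt
          rw [List.range'_succ, List.map_cons, List.sum_cons]
          ring
        rw [← harr]
        exact hm1
      · have harr : m - countLenB n k - sumCnt n (k + 1) (K - (k + 1)) =
            m - sumCnt n k (K - k) := by
          have hKk1 : K - k = (K - (k + 1)) + 1 := by omega
          rw [hKk1]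
          unfold sumCnt
          rw [List.range'_succ, List.map_cons, List.sum_cons]
          ring
        rw [← harr]
        exact hm2
    · refine ⟨k, ?_, le_refl _, ?_, ?_⟩
      · show skipB n (fuel + 1) k m = _
        rw [skipB]
        simp only [if_neg hgt]
        have h0 : sumCnt n k (k - k) = 0 := by
          unfold sumCnt
          simp
        rw [h0]
        norm_num
      · have h0 : sumCnt n k (k - k) = 0 := by unfold sumCnt; simp
        rw [h0]
        omega
      · have h0 : sumCnt n k (k - k) = 0 := by unfold sumCnt; simp
        rw [h0]
        omega

-- ---- pick / build ----

lemma pick_spec (j : Nat) : ∀ (fuel lo σ : Nat) (m : Int), lo ≤ 10 → 10 - lo ≤ fuel →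
    1 ≤ m → m ≤ ((enumD (j + 1) σ lo).length : Int) →
    ∃ (d : Nat) (m' : Int), pickB j (σ : Int) fuel (lo : Int) m = ((d : Int), m') ∧
      lo ≤ d ∧ d < 10 ∧ d ≤ σ ∧ 1 ≤ m' ∧ m' ≤ ((enumD j (σ - d) 0).length : Int) ∧
      (enumD (j + 1) σ lo).getD (m - 1).toNat [] =
        d :: (enumD j (σ - d) 0).getD (m' - 1).toNat [] := by
  intro fuel
  induction fuel with
  | zero =>
    intro lo σ m hlo hfu hm hlen
    have : lo = 10 := by omega
    subst this
    rw [enumD, if_neg (by omega)] at hlen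
    simp at hlen
    omega
  | succ fuel ih =>
    intro lo σ m hlo hfu hm hlen
    by_cases h10 : lo < 10
    · have hw : waysB j ((σ : Int) - (lo : Int)) =
          ((if lo ≤ σ then (enumD j (σ - lo) 0).map (lo :: ·) else []).length : Int) := by
        by_cases hls : lo ≤ σ
        · rw [if_pos hls]
          have hc : (σ : Int) - (lo : Int) = ((σ - lo : Nat) : Int) := by omega
          rw [hc, waysB_eq j _ (by omega)]
          simp
        · rw [if_neg hls, waysB_neg j _ (by omega)]
          simp
      rw [enumD, if_pos h10] at hlen ⊢
      rw [List.length_append] at hlen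
      by_cases hgt : m > waysB j ((σ : Int) - (lo : Int))
      · -- move to the next digit
        obtain ⟨d, m', heq, hd1, hd2, hd3, hd4, hd5, hd6⟩ :=
          ih (lo + 1) σ (m - waysB j ((σ : Int) - (lo : Int)))
            (by omega) (by omega) (by omega)
            (by rw [hw] at hgt ⊢; push_cast at hlen; omega)
        refine ⟨d, m', ?_, by omega, hd2, hd3, hd4, hd5, ?_⟩
        · rw [pickB]
          simp only [if_pos hgt]
          rw [show (lo : Int) + 1 = ((lo + 1 : Nat) : Int) by push_cast; ring]
          exact heq
        · rw [List.getD_append_right]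
          · rw [← hd6]
            congr 1
            rw [hw] at hgt
            omega
          · rw [hw] at hgt
            omega
      · -- stop at digit lo
        have hls : lo ≤ σ := by
          by_contra hcon
          rw [if_neg hcon] at hw
          simp at hw
          omega
        rw [if_pos hls] at hw hlen ⊢
        have hidx : (m - 1).toNat < ((enumD j (σ - lo) 0).map (lo :: ·)).length := by
          rw [hw] at hgt
          omega
        refine ⟨lo, m, ?_, le_refl _, h10, hls, hm, ?_, ?_⟩
        · rw [pickB]
          simp only [if_neg hgt]
        · rw [hw] at hgt
          simp only [List.length_map] at hgt
          omega
        · rw [List.getD_append _ _ _ _ hidx, List.getD_eq_getElem _ _ hidx,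
            List.getElem_map]
          congr 1
          rw [List.getD_eq_getElem]
    · have : lo = 10 := by omega
      subst this
      rw [enumD, if_neg (by omega)] at hlen
      simp at hlen
      omega

lemma build_spec (k : Nat) : ∀ (t : Nat) (num : Int) (σ : Nat) (m : Int),
    t ≤ k → 1 ≤ m → m ≤ ((enumD t σ (if t = k then 1 else 0)).length : Int) →
    buildB k t num (σ : Int) m =
      num * 10 ^ t + ((valD ((enumD t σ (if t = k then 1 else 0)).getD (m - 1).toNat []) : Nat) : Int) := by
  intro t
  induction t with
  | zero =>
    intro num σ m ht hm hlen
    have hσ : σ = 0 := by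
      by_contra hcon
      rw [enumD, if_neg hcon] at hlen
      simp at hlen
      omega
    subst hσ
    rw [enumD, if_pos rfl] at hlen ⊢
    simp only [List.length_cons, List.length_nil] at hlen
    have hm1 : m = 1 := by push_cast at hlen; omega
    subst hm1
    norm_num [buildB, valD]
  | succ t ih =>
    intro num σ m ht hm hlen
    set lo : Nat := if t + 1 = k then 1 else 0 with hlo
    have hlo10 : lo ≤ 10 := by rw [hlo]; split <;> omega
    obtain ⟨d, m', heq, hd1, hd2, hd3, hd4, hd5, hd6⟩ :=
      pick_spec t 10 lo σ m hlo10 (by omega) hm hlen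
    have htk : t ≠ k := by omega
    have hd0 : (if t + 1 = k then (1 : Int) else 0) = ((lo : Nat) : Int) := by
      rw [hlo]; split <;> simp
    rw [buildB]
    simp only [hd0, heq]
    have hcast : (σ : Int) - (d : Int) = ((σ - d : Nat) : Int) := by omega
    rw [hcast]
    have hlen0 : m' ≤ ((enumD t (σ - d) (if t = k then 1 else 0)).length : Int) := by
      rw [if_neg htk]
      exact hd5
    rw [ih (num * 10 + (d : Int)) (σ - d) m' (by omega) hd4 hlen0]
    rw [if_neg htk]
    rw [hd6]
    have hidx : (m' - 1).toNat < (enumD t (σ - d) 0).length := by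
      omega
    have hgl : (enumD t (σ - d) 0).getD (m' - 1).toNat [] ∈ enumD t (σ - d) 0 := by
      rw [List.getD_eq_getElem _ _ hidx]
      exact List.getElem_mem _
    have hll : ((enumD t (σ - d) 0).getD (m' - 1).toNat []).length = t :=
      mem_enumD_length t (σ - d) 0 _ hgl
    rw [valD_cons, hll]
    push_cast
    ring

theorem brute_calc_f_spec : Claim_equal_brute_calc_f := by
  intro n m _ hpre
  obtain ⟨hn, hm⟩ := hpre
  unfold Spec_brute_calc_f
  set q : Nat := (n.toNat - 1) / 9 with hq
  set E : Nat := (n.toNat + 8) / 9 + m.toNat with hE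
  set FB : Nat := (n.toNat + 8) / 9 + m.toNat + 2 with hFB
  have hqE : q + m.toNat ≤ E := by
    have : q ≤ (n.toNat + 8) / 9 := by omega
    omega
  -- skip-loop fuel sufficiency
  have hmid : (m.toNat : Int) ≤ sumCnt n (1 + q) m.toNat := by
    have h1 : ((List.range' (1 + q) m.toNat).length : Int) ≤
        ((List.range' (1 + q) m.toNat).map (fun i => countLenB n i)).sum := by
      refine sum_ge_len_int _ _ ?_
      intro i hi
      have := List.mem_range'_1.1 hi
      exact cnt_pos n hn i (by omega)
    simpa [sumCnt] using h1
  have hnn1 : 0 ≤ sumCnt n 1 q := by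
    refine sum_nonneg_int _ _ ?_
    intro i hi
    have := List.mem_range'_1.1 hi
    exact countLenB_nonneg n i (by omega) (by omega)
  have hnn2 : 0 ≤ sumCnt n (1 + q + m.toNat) (FB - q - m.toNat) := by
    refine sum_nonneg_int _ _ ?_
    intro i hi
    have := List.mem_range'_1.1 hi
    exact countLenB_nonneg n i (by omega) (by omega)
  have hsum : m ≤ sumCnt n 1 FB := by
    have hdecomp : sumCnt n 1 FB =
        sumCnt n 1 q + sumCnt n (1 + q) m.toNat + sumCnt n (1 + q + m.toNat) (FB - q - m.toNat) := by
      rw [show FB = q + (m.toNat + (FB - q - m.toNat)) by omega,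
        sumCnt_split n 1 q (m.toNat + (FB - q - m.toNat)),
        sumCnt_split n (1 + q) m.toNat (FB - q - m.toNat)]
      rw [show q + (m.toNat + (FB - q - m.toNat)) - q - m.toNat = FB - q - m.toNat by omega]
      ring
    rw [hdecomp]
    omega
  obtain ⟨K, hrun, hK1, hm'1, hm'2⟩ := skip_spec n FB 1 m (le_refl 1) hm hsum
  set m' : Int := m - sumCnt n 1 (K - 1) with hm'
  -- bound on K
  have hKbound : K ≤ q + m.toNat := by
    by_cases hKq : K - 1 ≤ q
    · omega
    · have hdec : sumCnt n 1 (K - 1) = sumCnt n 1 q + sumCnt n (1 + q) (K - 1 - q) := by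
        rw [show K - 1 = q + (K - 1 - q) by omega, sumCnt_split n 1 q (K - 1 - q)]
        rw [show q + (K - 1 - q) - q = K - 1 - q by omega]
      have hmid2 : ((K - 1 - q : Nat) : Int) ≤ sumCnt n (1 + q) (K - 1 - q) := by
        have h1 : ((List.range' (1 + q) (K - 1 - q)).length : Int) ≤
            ((List.range' (1 + q) (K - 1 - q)).map (fun i => countLenB n i)).sum := by
          refine sum_ge_len_int _ _ ?_
          intro i hi
          have := List.mem_range'_1.1 hi
          exact cnt_pos n hn i (by omega)
        simpa [sumCnt] using h1
      omega
  have hKE : K ≤ E := by omega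
  -- decompose A's scanned list
  have h1K : (1 : Nat) ≤ 10 ^ K := Nat.one_le_pow _ _ (by omega)
  have hKEpow : (10 : Nat) ^ K ≤ 10 ^ E := Nat.pow_le_pow_right (by omega) hKE
  have hsplitE : 10 ^ E = (10 ^ K - 1) + (10 ^ E - (10 ^ K - 1)) := by omega
  have hscan : scanL n 1 (10 ^ E) =
      (prefixL n (K - 1) ++ (enumD K n.toNat 1).map (fun l => ((valD l : Nat) : Int))) ++
        scanL n (1 + ((10 ^ K - 1 : Nat) : Int)) (10 ^ E - (10 ^ K - 1)) := by
    rw [hsplitE, scanL_append, prefix_eq n hn K]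
    congr 1
    · rw [show K = (K - 1) + 1 by omega]
      rfl
    · congr 1
      omega
  -- lengths
  have hL1 : ((prefixL n (K - 1)).length : Int) = sumCnt n 1 (K - 1) := prefixL_length n hn (K - 1)
  have hL2n : ((enumD K n.toNat 1).map (fun l => ((valD l : Nat) : Int))).length
      = (enumD K n.toNat 1).length := List.length_map _
  have hL2 : ((enumD K n.toNat 1).length : Int) = countLenB n K :=
    (countLenB_eq n K (by omega) (by omega)).symm
  -- A's result
  have hAlen : m.toNat ≤ (scanL n 1 (10 ^ E)).length := by
    rw [hscan, List.length_append, List.length_append, hL2n]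
    push_cast at hL1 hL2 ⊢
    omega
  have hA : brute_calc_f n m = (scanL n 1 (10 ^ E)).getD (m.toNat - 1) 0 := by
    unfold brute_calc_f
    rw [← hE]
    exact bruteLoop_eq n (10 ^ E) 1 m hm hAlen
  -- index arithmetic
  have hidx1 : (prefixL n (K - 1)).length ≤ m.toNat - 1 := by
    push_cast at hL1
    omega
  have hidx2 : m.toNat - 1 - (prefixL n (K - 1)).length = (m' - 1).toNat := by
    push_cast at hL1
    omega
  have hidx3 : (m' - 1).toNat < ((enumD K n.toNat 1).map (fun l => ((valD l : Nat) : Int))).length := by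
    rw [hL2n]
    push_cast at hL2 ⊢
    omega
  have hgetA : (scanL n 1 (10 ^ E)).getD (m.toNat - 1) 0 =
      ((valD ((enumD K n.toNat 1).getD (m' - 1).toNat []) : Nat) : Int) := by
    rw [hscan]
    rw [List.getD_append _ _ _ _ (by
      rw [List.length_append, hL2n]
      have h3 := hidx3
      rw [hL2n] at h3
      omega)]
    rw [List.getD_append_right _ _ _ _ hidx1, hidx2]
    have hidx3' : (m' - 1).toNat < (enumD K n.toNat 1).length := by
      have h3 := hidx3
      rwa [hL2n] at h3
    rw [List.getD_eq_getElem _ _ hidx3, List.getElem_map, List.getD_eq_getElem _ _ hidx3']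
  -- B's result
  have hB : brute_calc_f_alt n m =
      ((valD ((enumD K n.toNat 1).getD (m' - 1).toNat []) : Nat) : Int) := by
    unfold brute_calc_f_alt
    rw [← hFB, hrun]
    simp only []
    have hnint : n = ((n.toNat : Nat) : Int) := by omega
    have hb := build_spec K K 0 n.toNat m' (le_refl K) hm'1 (by
      rw [if_pos rfl]
      omega)
    rw [if_pos rfl] at hb
    calc buildB K K 0 n m' = buildB K K 0 ((n.toNat : Nat) : Int) m' := by rw [← hnint]
    _ = 0 * 10 ^ K + ((valD ((enumD K n.toNat 1).getD (m' - 1).toNat []) : Nat) : Int) := hb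
    _ = _ := by ring
  rw [hA, hgetA, hB]
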